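-- pv_equiv track=rewrite | github.com/TMInstaller/Python-Coding-Test | 프로그래머스 1단계/[1차] 비밀지도.py | solution
-- ===== SOURCE A (Python) =====
-- def solution(n, arr1, arr2):
--     answer = []
--     # 각각의 지도들을 한번에 2진수로 바꾸고
--     # bin()을 사용하면 앞에 0b가 붙으므로 이를 슬라이싱 해 준 다음
--     # 한 변의 길이가 n이므로 비어있는 앞 공간을 0으로 채워준다
--     # 그 후 1을 #으로, 0을 공백으로 치환해서 정답 출력
--     for i in range(n):
--         # bin(a|b)를 하면 하나라도 1이 될 경우 1로 출력한다
--         t = bin(arr1[i] | arr2[i])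
--         t = t[2:].zfill(n)
--         t = t.replace('1', '#').replace('0', ' ')
--         answer.append(t)
--     return answer
-- ===== SOURCE B (Python) =====
-- def solution(n, arr1, arr2):
--     answer = []
--     for i in range(n):
--         v = arr1[i] | arr2[i]
--         width = max(n, v.bit_length())
--         row = ''.join('#' if (v >> j) & 1 else ' ' for j in reversed(range(width)))
--         answer.append(row)
--     return answer
-- ===== Notes on version B (the rewrite author's own statement) =====
-- stated objective: alternative
-- what changed: Each row is built directly from the bits of v = arr1[i] | arr2[i], testing (v >> j) & 1 for j from max(n, v.bit_length())-1 down to 0, instead of A's bin()/slice/zfill/replace string pipeline.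
-- outside the precondition, e.g. on solution(1, [-1], [0]): A returns ['b#'], B returns ['#']; on solution(2, [-2, 1], [0, 1]): A returns ['b# ', ' #'], B returns ['# ', ' #']
import Mathlib
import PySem

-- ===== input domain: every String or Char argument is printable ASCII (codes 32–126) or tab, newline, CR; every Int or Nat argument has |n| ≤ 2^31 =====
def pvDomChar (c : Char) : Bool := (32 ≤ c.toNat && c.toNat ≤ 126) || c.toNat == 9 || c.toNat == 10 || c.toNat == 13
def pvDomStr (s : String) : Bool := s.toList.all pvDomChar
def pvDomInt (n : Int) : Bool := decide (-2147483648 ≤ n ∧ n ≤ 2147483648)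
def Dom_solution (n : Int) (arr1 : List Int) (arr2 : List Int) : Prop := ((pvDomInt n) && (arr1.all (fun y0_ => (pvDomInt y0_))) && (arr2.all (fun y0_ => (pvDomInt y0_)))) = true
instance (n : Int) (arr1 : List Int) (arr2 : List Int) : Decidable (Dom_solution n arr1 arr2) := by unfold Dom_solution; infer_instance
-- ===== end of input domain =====

-- B builds each row directly from the bits of arr1[i] | arr2[i] (per-bit test over a zip of the
-- truncated arrays) instead of A's bin()/slice/zfill/replace string pipeline; objective:
-- alternative decomposition, same cost.

-- ===== PORT A =====
-- literal transliteration of A: for i in range(n): t = bin(arr1[i] | arr2[i]);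
-- t = t[2:].zfill(n); t = t.replace('1','#').replace('0',' '); answer.append(t)
-- (the sequentially reassigned t is written as the nested application of the same steps;
-- arr[i] with i from range(n) is in range under Pre_, so pyGetD is exact there)
def solution (n : Int) (arr1 : List Int) (arr2 : List Int) : List String :=
  (PySem.List.pyRange 0 n 1).foldl (fun answer i =>
    answer ++ [PySem.Str.replace (PySem.Str.replace (PySem.Str.zfill (PySem.Str.slice
      (PySem.Int.pyBin (PySem.Int.bor (PySem.List.pyGetD arr1 i 0) (PySem.List.pyGetD arr2 i 0)))
      (some 2) none) n) "1" "#") "0" " "]) []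

-- ===== PORT B =====
-- one row: ''.join('#' if (v >> j) & 1 else ' ' for j in reversed(range(width)))
-- (every j in the range is ≥ 0, so Python's v >> j is exactly v >>> j.toNat)
def rowAlt (n : Int) (v : Int) : String :=
  PySem.Str.join "" ((PySem.List.pyRange 0 (max n ((PySem.Int.bitLength v : Int))) 1).reverse.map
    (fun j => if PySem.Int.band (v >>> j.toNat) 1 ≠ 0 then "#" else " "))

-- for i in range(n): v = arr1[i] | arr2[i]; …; answer.append(row)
def solution_alt (n : Int) (arr1 : List Int) (arr2 : List Int) : List String :=
  (PySem.List.pyRange 0 n 1).foldl (fun answer i =>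
    answer ++ [rowAlt n (PySem.Int.bor (PySem.List.pyGetD arr1 i 0) (PySem.List.pyGetD arr2 i 0))]) []

-- ===== PRECONDITION & SPEC =====
-- Pre_ restricts to the problem's natural domain: n ≤ both lengths (A raises IndexError when n
-- exceeds a length) and the n used entries are nonnegative (map rows are nonnegative by the
-- problem statement; on a negative entry A keeps a stray 'b' from bin()'s '-0b' prefix, an
-- accidental output neither implementation should be held to).
def Pre_solution (n : Int) (arr1 : List Int) (arr2 : List Int) : Prop :=
  n ≤ arr1.length ∧ n ≤ arr2.length ∧
    (∀ x ∈ arr1.take n.toNat, 0 ≤ x) ∧ (∀ x ∈ arr2.take n.toNat, 0 ≤ x)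
instance (n : Int) (arr1 : List Int) (arr2 : List Int) : Decidable (Pre_solution n arr1 arr2) := by
  unfold Pre_solution; infer_instance

def pvWitness_solution : Int × List Int × List Int := (2, ⟨[9, 20], [30, 1]⟩)

def Spec_solution (n : Int) (arr1 : List Int) (arr2 : List Int) (out : List String) : Prop :=
  out = solution_alt n arr1 arr2
instance (n : Int) (arr1 : List Int) (arr2 : List Int) (out : List String) : Decidable (Spec_solution n arr1 arr2 out) := by unfold Spec_solution; infer_instance

-- ===== CLAIM (what is proved, stated in full; the proofs are below) =====
def Claim_equal_solution : Prop := ∀ (n : Int) (arr1 : List Int) (arr2 : List Int), Dom_solution n arr1 arr2 → Pre_solution n arr1 arr2 → Spec_solution n arr1 arr2 (solution n arr1 arr2)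

-- ===== LEMMAS AND PROOFS =====

-- msb-first character list of the low w bits of m, as '1'/'0' resp. '#'/' '
def bitsChars (m : Nat) (w : Nat) : List Char :=
  (List.range w).reverse.map (fun j => if m.testBit j then '1' else '0')

def hashChars (m : Nat) (w : Nat) : List Char :=
  (List.range w).reverse.map (fun j => if m.testBit j then '#' else ' ')

lemma foldl_snoc_eq_map {α β : Type} (f : α → β) (l : List α) (acc : List β) :
    l.foldl (fun a x => a ++ [f x]) acc = acc ++ l.map f := by
  induction l generalizing acc with
  | nil => simp
  | cons x xs ih => simp [List.foldl_cons, ih]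

lemma length_bitsChars (m w : Nat) : (bitsChars m w).length = w := by
  simp [bitsChars]

lemma bitsChars_succ (m w : Nat) :
    bitsChars m (w + 1) = bitsChars (m / 2) w ++ [if m.testBit 0 then '1' else '0'] := by
  unfold bitsChars
  rw [List.range_succ_eq_map]
  simp [List.map_reverse, List.map_map, Function.comp_def, Nat.testBit_succ]

lemma size_eq_size_div2 (m : Nat) (h : 1 ≤ m) : m.size = (m / 2).size + 1 := by
  have hlt := Nat.lt_size_self (m / 2)
  have h1 : m < 2 ^ ((m / 2).size + 1) := by
    rw [pow_succ]
    omega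
  have h2 : 2 ^ (m / 2).size ≤ m := by
    rcases Nat.eq_zero_or_pos (m / 2) with h0 | h0
    · rw [h0]; simpa [Nat.size_zero] using h
    · have hs : 0 < (m / 2).size := Nat.size_pos.mpr h0
      have hle : 2 ^ ((m / 2).size - 1) ≤ m / 2 := Nat.lt_size.mp (by omega)
      have hp : 2 ^ (m / 2).size = 2 * 2 ^ ((m / 2).size - 1) := by
        conv_lhs => rw [← Nat.sub_add_cancel hs]
        rw [pow_succ]; ring
      omega
  have h3 := Nat.size_le.mpr h1
  have h4 := Nat.lt_size.mpr h2
  omega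

lemma digitChar_mod_two (m : Nat) :
    Nat.digitChar (m % 2) = if m.testBit 0 then '1' else '0' := by
  have : m % 2 = 0 ∨ m % 2 = 1 := by omega
  rcases this with h | h <;> simp [h, Nat.digitChar, Nat.testBit_zero]

lemma toDigitsCore_eq : ∀ (fuel : Nat), ∀ (m : Nat) (l : List Char), 0 < fuel → m < 2 ^ fuel →
    Nat.toDigitsCore 2 fuel m l = bitsChars m (max m.size 1) ++ l := by
  intro fuel
  induction fuel with
  | zero => intro m l h _; omega
  | succ f ih =>
    intro m l _ hm
    rw [Nat.toDigitsCore]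
    by_cases h0 : m / 2 = 0
    · rw [if_pos h0]
      have : m = 0 ∨ m = 1 := by omega
      rcases this with rfl | rfl <;>
        simp [bitsChars, Nat.size_zero, Nat.digitChar, Nat.testBit_zero]
    · rw [if_neg h0]
      have hdiv : m / 2 < 2 ^ f := by
        rw [pow_succ] at hm
        omega
      have hf : 0 < f := by
        rcases Nat.eq_zero_or_pos f with rfl | h; · simp at hdiv; omega
        · exact h
      rw [ih (m / 2) _ hf hdiv]
      have hm2 : 2 ≤ m := by omega
      have hs2 : 0 < (m / 2).size := Nat.size_pos.mpr (by omega)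
      have hs1 : 0 < m.size := Nat.size_pos.mpr (by omega)
      rw [max_eq_left hs2, max_eq_left hs1, size_eq_size_div2 m (by omega), bitsChars_succ]
      simp [digitChar_mod_two]

lemma toDigits_two_eq (m : Nat) : Nat.toDigits 2 m = bitsChars m (max m.size 1) := by
  unfold Nat.toDigits
  rw [toDigitsCore_eq (m + 1) m [] (by omega)
    (lt_of_lt_of_le (Nat.lt_two_pow_self) (Nat.pow_le_pow_right (by norm_num) (by omega)))]
  simp

lemma bitsChars_pad (m w W : Nat) (hsz : m.size ≤ w) (hW : w ≤ W) :
    bitsChars m W = List.replicate (W - w) '0' ++ bitsChars m w := by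
  unfold bitsChars
  have hWw : W = w + (W - w) := by omega
  rw [hWw, List.range_add, List.reverse_append, List.map_append]
  congr 1
  have hall : ∀ j ∈ ((List.range (W - w)).map (fun k => w + k)).reverse,
      (if m.testBit j then '1' else '0') = '0' := by
    intro j hj
    simp only [List.mem_reverse, List.mem_map, List.mem_range] at hj
    obtain ⟨k, _, rfl⟩ := hj
    have hlt : m < 2 ^ (w + k) :=
      lt_of_lt_of_le (Nat.lt_size_self m) (Nat.pow_le_pow_right (by norm_num) (by omega))
    simp [Nat.testBit_lt_two_pow hlt]
  rw [List.map_congr_left hall]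
  simp [List.eq_replicate_iff]

lemma replace_go_single (c d : Char) : ∀ (fuel : Nat) (l acc : List Char), l.length ≤ fuel →
    PySem.Chars.replace.go [c] [d] fuel l acc
      = acc.reverse ++ l.map (fun x => if x = c then d else x) := by
  intro fuel
  induction fuel with
  | zero =>
    intro l acc h
    have : l = [] := List.eq_nil_of_length_eq_zero (by omega)
    subst this
    simp [PySem.Chars.replace.go]
  | succ f ih =>
    intro l acc h
    cases l with
    | nil => simp [PySem.Chars.replace.go]
    | cons x t =>
      rw [PySem.Chars.replace.go]
      by_cases hx : x = c
      · subst hx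
        rw [if_pos (by simp [List.isPrefixOf])]
        rw [ih _ _ (by simp at h ⊢; omega)]
        simp
      · rw [if_neg (by simp [List.isPrefixOf]; exact fun hc => (hx hc.symm).elim)]
        rw [ih _ _ (by simp at h; omega)]
        simp [hx]

lemma replace_single (s : List Char) (c d : Char) :
    PySem.Chars.replace s [c] [d] = s.map (fun x => if x = c then d else x) := by
  unfold PySem.Chars.replace
  rw [if_neg (by simp)]
  simp [replace_go_single c d s.length s [] le_rfl]

lemma bitLength_natCast_eq_size (m : Nat) : PySem.Int.bitLength (m : Int) = m.size := by
  rcases Nat.eq_zero_or_pos m with rfl | hm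
  · rw [Nat.cast_zero, PySem.Int.bitLength_zero, Nat.size_zero]
  · have h1 := PySem.Int.lt_two_pow_bitLength (m : Int)
    have h2 := PySem.Int.two_pow_bitLength_le (m : Int) (by exact_mod_cast hm.ne')
    rw [Int.natAbs_natCast] at h1 h2
    have hs1 : m.size ≤ PySem.Int.bitLength (m : Int) := Nat.size_le.mpr h1
    have hL : 1 ≤ PySem.Int.bitLength (m : Int) := by
      by_contra hL
      have : PySem.Int.bitLength (m : Int) = 0 := by omega
      rw [this] at h1
      simp at h1
      omega
    have hs2 : PySem.Int.bitLength (m : Int) - 1 < m.size := Nat.lt_size.mpr h2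
    omega

lemma zfill_bits (m w : Nat) (hw1 : 1 ≤ w) (hsz : m.size ≤ w) (n : Int) :
    PySem.Chars.zfill (bitsChars m w) n = bitsChars m (max n.toNat w) := by
  by_cases hle : n ≤ ((bitsChars m w).length : Int)
  · unfold PySem.Chars.zfill
    rw [if_pos hle]
    rw [length_bitsChars] at hle
    rw [max_eq_right (by omega)]
  · rw [length_bitsChars] at hle
    obtain ⟨c, rest, hcr⟩ : ∃ c rest, bitsChars m w = c :: rest := by
      cases hh : bitsChars m w with
      | nil => exact absurd (by simpa [hh] using length_bitsChars m w) (by omega)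
      | cons a b => exact ⟨a, b, rfl⟩
    have hc : c = '0' ∨ c = '1' := by
      have hmem : c ∈ bitsChars m w := by rw [hcr]; exact List.mem_cons_self
      unfold bitsChars at hmem
      simp only [List.mem_map, List.mem_reverse, List.mem_range] at hmem
      obtain ⟨j, _, hj⟩ := hmem
      by_cases hb : m.testBit j
      · right; rw [← hj]; simp [hb]
      · left; rw [← hj]; simp [hb]
    have hlen2 : (c :: rest).length = w := by rw [← hcr]; exact length_bitsChars m w
    rw [hcr]
    unfold PySem.Chars.zfill
    rw [if_neg (by rw [hlen2]; exact hle)]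
    show (if c = '+' ∨ c = '-' then c :: (List.replicate (n.toNat - (c :: rest).length) '0' ++ rest)
        else List.replicate (n.toNat - (c :: rest).length) '0' ++ c :: rest)
      = bitsChars m (max n.toNat w)
    rw [if_neg (by rcases hc with rfl | rfl <;> simp)]
    rw [hlen2, ← hcr, max_eq_left (by omega)]
    rw [bitsChars_pad m w n.toNat hsz (by omega)]

lemma band_shift_eq_testBit (m k : Nat) :
    (PySem.Int.band ((m : Int) >>> k) 1 ≠ 0) ↔ m.testBit k = true := by
  rw [← Int.natCast_shiftRight]
  rw [show (1 : Int) = ((1 : Nat) : Int) from by norm_num, PySem.Int.band_natCast]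
  rw [Nat.and_one_is_mod]
  unfold Nat.testBit
  rw [Nat.one_and_eq_mod_two]
  have hmod : m >>> k % 2 = 0 ∨ m >>> k % 2 = 1 := by omega
  rcases hmod with hm1 | hm1 <;> simp [hm1]

lemma rowAlt_toList (n : Int) (m : Nat) :
    (rowAlt n (m : Int)).toList = hashChars m (max n.toNat m.size) := by
  unfold rowAlt
  rw [bitLength_natCast_eq_size]
  have hw : max n ((m.size : Nat) : Int) = ((max n.toNat m.size : Nat) : Int) := by omega
  rw [hw, PySem.List.pyRange_zero_nat, PySem.Str.toList_join]
  rw [← List.map_reverse, List.map_map, List.map_map]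
  have hmaps : ((List.range (max n.toNat m.size)).reverse).map
        ((String.toList ∘ fun j : Int => if PySem.Int.band ((m : Int) >>> ((j.toNat : Int))) 1 ≠ 0 then "#" else " ") ∘ (fun k : Nat => (k : Int)))
      = ((List.range (max n.toNat m.size)).reverse.map (fun k => if m.testBit k then '#' else ' ')).map (fun c => [c]) := by
    rw [List.map_map]
    apply List.map_congr_left
    intro k _
    simp only [Function.comp_apply, Int.toNat_natCast]
    have hb2 : (PySem.Int.band ((m : Int) >>> ((k : Nat) : Int)) 1 ≠ 0) ↔ m.testBit k = true := by
      rw [Int.shiftRight_natCast m k]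
      exact band_shift_eq_testBit m k
    by_cases hb : m.testBit k
    · rw [if_pos (hb2.mpr hb), if_pos hb]
      decide
    · rw [if_neg (fun hc => hb (hb2.mp hc)), if_neg hb]
      decide
  rw [hmaps]
  rw [show ("" : String).toList = [] from by decide, PySem.Chars.join_nil_singletons]
  rfl

lemma rowA_toList (n : Int) (m : Nat) :
    (PySem.Str.replace (PySem.Str.replace (PySem.Str.zfill
        (PySem.Str.slice (PySem.Int.pyBin (m : Int)) (some 2) none) n) "1" "#") "0" " ").toList
      = hashChars m (max n.toNat (max m.size 1)) := by
  rw [PySem.Str.toList_replace, PySem.Str.toList_replace, PySem.Str.toList_zfill]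
  have hsl : (PySem.Str.slice (PySem.Int.pyBin (m : Int)) (some 2) none).toList
      = Nat.toDigits 2 m := by
    rw [PySem.Str.toList_slice, PySem.Chars.slice_eq_listSlice, PySem.Int.toList_pyBin]
    unfold PySem.Int.toBinChars0b
    rw [if_neg (by omega), Int.toNat_natCast]
    rw [PySem.List.slice_from _ (by norm_num : (0 : Int) ≤ 2)]
    simp
  rw [hsl, toDigits_two_eq, zfill_bits m _ (le_max_right _ _) (le_max_left _ _) n]
  rw [show ("1" : String).toList = ['1'] from by decide,
    show ("#" : String).toList = ['#'] from by decide,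
    show ("0" : String).toList = ['0'] from by decide,
    show (" " : String).toList = [' '] from by decide]
  rw [replace_single, replace_single, List.map_map]
  unfold bitsChars hashChars
  rw [List.map_map]
  apply List.map_congr_left
  intro j _
  by_cases hb : m.testBit j <;> simp [hb]

lemma row_eq (n : Int) (hn : 1 ≤ n) (m : Nat) :
    PySem.Str.replace (PySem.Str.replace (PySem.Str.zfill
        (PySem.Str.slice (PySem.Int.pyBin (m : Int)) (some 2) none) n) "1" "#") "0" " "
      = rowAlt n (m : Int) := by
  rw [← String.toList_inj, rowA_toList n m, rowAlt_toList n m]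
  have : max n.toNat (max m.size 1) = max n.toNat m.size := by omega
  rw [this]

-- ===== VERDICT (by name: the statement is the Claim_ definition above) =====
theorem solution_spec : Claim_equal_solution := by
  intro n arr1 arr2 _ hpre
  obtain ⟨h1, h2, ha, hb⟩ := hpre
  unfold Spec_solution solution solution_alt
  rw [foldl_snoc_eq_map, foldl_snoc_eq_map, List.nil_append, List.nil_append]
  apply List.map_congr_left
  intro i hi
  obtain ⟨hi0, hin⟩ := (PySem.List.mem_pyRange_one).mp hi
  obtain ⟨k, rfl⟩ : ∃ k : Nat, i = (k : Int) := ⟨i.toNat, (Int.toNat_of_nonneg hi0).symm⟩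
  have hk1 : k < arr1.length := by omega
  have hk2 : k < arr2.length := by omega
  rw [PySem.List.pyGetD_natCast, PySem.List.pyGetD_natCast,
    List.getD_eq_getElem arr1 0 hk1, List.getD_eq_getElem arr2 0 hk2]
  have hax : 0 ≤ arr1[k] := by
    have hm : (arr1.take n.toNat)[k]'(by simp [List.length_take]; omega) ∈ arr1.take n.toNat :=
      List.getElem_mem _
    rw [List.getElem_take] at hm
    exact ha _ hm
  have hbx : 0 ≤ arr2[k] := by
    have hm : (arr2.take n.toNat)[k]'(by simp [List.length_take]; omega) ∈ arr2.take n.toNat :=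
      List.getElem_mem _
    rw [List.getElem_take] at hm
    exact hb _ hm
  rw [PySem.Int.bor_of_nonneg hax hbx]
  exact row_eq n (by omega) _
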